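-- pv_equiv track=rewrite | github.com/naderafsh/pmac-config-manager | tpmac_config_manager/quicktest.py | strip_in_brackets
-- ===== SOURCE A (Python) =====
-- def strip_in_brackets(_src, brackets='()', to_strip=' \n\t\r'):
--     """removes all ws within brackets"""
--
--     # TODO make this hack code pythonic
--     p_count = 0
--     _src_out = ''
--     for char in _src:
--         if char==brackets[0]:
--             p_count += 1
--         elif char==brackets[1]:
--             p_count -= 1
--         elif (char in to_strip) and (p_count != 0):
--             char = ''
--         _src_out += char
--     return _src_out
-- ===== SOURCE B (Python) =====
-- def strip_in_brackets(_src, brackets='()', to_strip=' \n\t\r'):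
--     """removes all ws within brackets (two-phase: depth sequence, then filter)"""
--     depth = 0
--     depths = []
--     for char in _src:
--         depth += 1 if char == brackets[0] else (-1 if char == brackets[1] else 0)
--         depths.append(depth)
--     return ''.join(c for c, d in zip(_src, depths)
--                    if not (c in to_strip and c != brackets[0] and c != brackets[1] and d != 0))
-- ===== Notes on version B (the rewrite author's own statement) =====
-- stated objective: alternative
-- what changed: Replaces A's single stateful loop (counter + string accumulation with in-loop char blanking) by a two-phase computation: first build the inclusive running bracket-depth sequence, then filter-and-join the characters by zipping them with their depths.
import Mathlib
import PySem

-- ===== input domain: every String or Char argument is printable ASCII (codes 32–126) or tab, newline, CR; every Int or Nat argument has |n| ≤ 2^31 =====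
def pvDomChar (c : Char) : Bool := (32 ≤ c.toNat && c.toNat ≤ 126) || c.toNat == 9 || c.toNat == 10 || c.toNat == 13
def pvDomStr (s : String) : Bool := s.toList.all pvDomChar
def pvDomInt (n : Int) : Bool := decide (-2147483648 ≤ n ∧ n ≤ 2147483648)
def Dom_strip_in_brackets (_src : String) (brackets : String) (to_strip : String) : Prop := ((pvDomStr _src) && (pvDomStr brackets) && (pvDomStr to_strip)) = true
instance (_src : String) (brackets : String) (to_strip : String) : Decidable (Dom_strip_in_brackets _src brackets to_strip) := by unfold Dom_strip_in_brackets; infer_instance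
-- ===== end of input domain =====

-- B replaces A's single stateful loop by a build-depths-then-filter two-phase computation; objective: alternative decomposition (same cost).

-- ===== PORT A =====
-- A's loop: state (p_count, _src_out); brackets[0]/brackets[1] as in Python (raise = excluded by Pre_; getD default is never consulted on inputs admitted by Pre_).
def strip_in_brackets (_src : String) (brackets : String) (to_strip : String) : String :=
  let b0 := (PySem.Str.pyGet? brackets 0).getD ' '
  let b1 := (PySem.Str.pyGet? brackets 1).getD ' '
  let st := _src.toList.foldl (fun (st : Int × List Char) char =>
      if char = b0 then (st.1 + 1, st.2 ++ [char])
      else if char = b1 then (st.1 - 1, st.2 ++ [char])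
      else if char ∈ to_strip.toList ∧ st.1 ≠ 0 then (st.1, st.2)
      else (st.1, st.2 ++ [char])) ((0 : Int), ([] : List Char))
  String.mk st.2

-- ===== PORT B =====
-- B phase 1: inclusive running depth sequence (scanl then tail, = the Python loop appending `depth`).
def pvB_depths (b0 b1 : Char) (l : List Char) : List Int :=
  (l.scanl (fun d c => d + (if c = b0 then (1 : Int) else if c = b1 then -1 else 0)) 0).tail
-- B phase 2: zip with depths, filter, join.
def strip_in_brackets_alt (_src : String) (brackets : String) (to_strip : String) : String :=
  let b0 := (PySem.Str.pyGet? brackets 0).getD ' '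
  let b1 := (PySem.Str.pyGet? brackets 1).getD ' '
  String.mk (((_src.toList.zip (pvB_depths b0 b1 _src.toList)).filter
      (fun p => !(decide (p.1 ∈ to_strip.toList) && decide (p.1 ≠ b0) && decide (p.1 ≠ b1) && decide (p.2 ≠ 0)))).map Prod.fst)

-- ===== PRECONDITION & SPEC =====
-- Pre_ excludes exactly the inputs where the Python A raises IndexError on brackets[0]/brackets[1]:
-- brackets too short for the accesses the loop actually performs.
def Pre_strip_in_brackets (_src : String) (brackets : String) (to_strip : String) : Prop :=
  _src = "" ∨ 2 ≤ brackets.toList.length ∨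
    (brackets.toList.length = 1 ∧ ∀ c ∈ _src.toList, c = brackets.toList.headD ' ')
instance (_src : String) (brackets : String) (to_strip : String) : Decidable (Pre_strip_in_brackets _src brackets to_strip) := by unfold Pre_strip_in_brackets; infer_instance
def pvWitness_strip_in_brackets : String × String × String := ("a (b  c) d", "()", " \n\t\r")
def Spec_strip_in_brackets (_src : String) (brackets : String) (to_strip : String) (out : String) : Prop := out = strip_in_brackets_alt _src brackets to_strip
instance (_src : String) (brackets : String) (to_strip : String) (out : String) : Decidable (Spec_strip_in_brackets _src brackets to_strip out) := by unfold Spec_strip_in_brackets; infer_instance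

-- ===== CLAIM (what is proved, stated in full; the proofs are below) =====
def Claim_equal_strip_in_brackets : Prop := ∀ (_src : String) (brackets : String) (to_strip : String), Dom_strip_in_brackets _src brackets to_strip → Pre_strip_in_brackets _src brackets to_strip → Spec_strip_in_brackets _src brackets to_strip (strip_in_brackets _src brackets to_strip)

-- ===== LEMMAS AND PROOFS =====

-- zip with a scanl sequence unfolds one step (scanl is always nonempty).
theorem pv_zip_scanl {α β : Type} (f : β → α → β) (a : β) (c : α) (l : List α) :
    (c :: l).zip (List.scanl f a l) = (c, a) :: l.zip ((List.scanl f a l).tail) := by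
  cases l <;> simp

-- Loop invariant: A's fold from state (d, acc) produces acc ++ B's filtered zip with depths starting at d.
theorem pv_loop_eq (b0 b1 : Char) (ts : List Char) :
    ∀ (l : List Char) (d : Int) (acc : List Char),
      (l.foldl (fun (st : Int × List Char) char =>
        if char = b0 then (st.1 + 1, st.2 ++ [char])
        else if char = b1 then (st.1 - 1, st.2 ++ [char])
        else if char ∈ ts ∧ st.1 ≠ 0 then (st.1, st.2)
        else (st.1, st.2 ++ [char])) (d, acc)).2
      = acc ++ ((l.zip ((l.scanl (fun d c => d + (if c = b0 then (1 : Int) else if c = b1 then -1 else 0)) d).tail)).filter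
          (fun p => !(decide (p.1 ∈ ts) && decide (p.1 ≠ b0) && decide (p.1 ≠ b1) && decide (p.2 ≠ 0)))).map Prod.fst := by
  intro l
  induction l with
  | nil => intro d acc; simp
  | cons c l ih =>
    intro d acc
    simp only [List.foldl_cons, List.scanl_cons, List.tail_cons, pv_zip_scanl, List.filter_cons]
    by_cases h0 : c = b0
    · subst h0
      rw [if_pos rfl, ih]
      simp
    · by_cases h1 : c = b1
      · subst h1
        rw [if_neg h0, if_pos rfl, ih]
        simp [h0, sub_eq_add_neg]
      · rw [if_neg h0, if_neg h1]
        by_cases hs : c ∈ ts ∧ d ≠ 0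
        · rw [if_pos hs, ih]
          simp [h0, h1, hs.1, hs.2]
        · rw [if_neg hs, ih]
          have hcond : c ∉ ts ∨ d = 0 := by
            rcases not_and_or.mp hs with h | h
            · exact Or.inl h
            · exact Or.inr (not_not.mp h)
          simp [h0, h1, hcond]

-- ===== VERDICT (by name: the statement is the Claim_ definition above) =====
theorem strip_in_brackets_spec : Claim_equal_strip_in_brackets := by
  intro _src brackets to_strip _ _
  unfold Spec_strip_in_brackets strip_in_brackets strip_in_brackets_alt pvB_depths
  simp only []
  rw [pv_loop_eq]
  simp
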